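-- pv_equiv track=rewrite | github.com/chaeri93/Algorithm | Backjun/Silver/Lv3/1213.py | solution
-- ===== SOURCE A (Python) =====
-- from collections import Counter
--
-- def solution(text):
--
--     mid = ''
--     result = ''
--
--     for key, value in sorted(Counter(text).items()):
--         if value % 2 == 1:
--             if len(mid) == 1:
--                 return "I'm Sorry Hansoo"
--             mid = key
--         result += key * (value // 2)
--
--     return result + mid + result[::-1]
-- ===== SOURCE B (Python) =====
-- def solution(text):
--     s = sorted(text)
--     odd = [c for c in set(text) if s.count(c) % 2]
--     if len(odd) > 1:
--         return "I'm Sorry Hansoo"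
--     mid = odd[0] if odd else ''
--     if mid:
--         s.remove(mid)
--     half = ''.join(s[0::2])
--     return half + mid + half[::-1]
-- ===== Notes on version B (the rewrite author's own statement) =====
-- stated objective: alternative
-- what changed: Instead of accumulating half/mid while folding over sorted Counter items, B first decides feasibility by listing the odd-count characters of set(text), then removes one copy of the middle character from sorted(text) and builds the half directly as the stride-2 slice s[0::2] of the sorted characters (adjacent equal chars pair up).
import Mathlib
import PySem

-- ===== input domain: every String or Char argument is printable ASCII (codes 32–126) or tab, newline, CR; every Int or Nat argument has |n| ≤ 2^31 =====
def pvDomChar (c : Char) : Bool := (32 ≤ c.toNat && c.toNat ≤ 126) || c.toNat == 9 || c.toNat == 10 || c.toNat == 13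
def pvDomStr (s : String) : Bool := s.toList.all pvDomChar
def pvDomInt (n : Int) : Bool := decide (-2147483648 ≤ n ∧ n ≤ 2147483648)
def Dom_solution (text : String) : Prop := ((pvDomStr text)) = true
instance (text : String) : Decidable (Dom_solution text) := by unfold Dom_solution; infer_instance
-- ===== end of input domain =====

-- B decides feasibility first (odd-count chars of set(text)), then builds the half of the
-- palindrome as the stride-2 slice s[0::2] of sorted(text) with one middle copy removed —
-- an alternative construction, same exact result including the "I'm Sorry Hansoo" case.

-- ===== PORT A =====
-- the for-loop over sorted(Counter(text).items()); strings are carried as List Char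
-- (Python's `key * (value // 2)` is List.replicate, `result[::-1]` is List.reverse — both exact here)
def solutionLoop : List (Char × Int) → List Char → List Char → List Char
  | [], mid, result => result ++ mid ++ result.reverse
  | (key, value) :: rest, mid, result =>
    if PySem.Int.mod value 2 == 1 then
      if mid.length == 1 then "I'm Sorry Hansoo".toList
      else solutionLoop rest [key] (result ++ List.replicate (PySem.Int.floordiv value 2).toNat key)
    else solutionLoop rest mid (result ++ List.replicate (PySem.Int.floordiv value 2).toNat key)

def solution (text : String) : String :=
  String.ofList (solutionLoop
    (PySem.List.sorted2 (PySem.Dict.counter text.toList).items (·.1) (·.2))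
    [] [])

-- ===== PORT B =====
-- s[0::2], ported by hand (exact: every second code point of the list, starting at index 0)
def everySecond : List Char → List Char
  | [] => []
  | [a] => [a]
  | a :: _ :: t => a :: everySecond t

def solution_alt (text : String) : String :=
  let s := PySem.List.sorted text.toList (fun x => x) false
  let odd := (PySem.Set.ofList text.toList).filter (fun c => s.count c % 2 == 1)
  if 1 < odd.length then "I'm Sorry Hansoo"
  else
    let mid := odd.take 1                       -- odd[0] if odd else ''
    let s' := match mid with                    -- if mid: s.remove(mid)
      | [] => s
      | m :: _ => (PySem.List.remove? s m).getD s   -- m ∈ s always holds; getD only makes this total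
    let half := everySecond s'                  -- ''.join(s[0::2])
    String.ofList (half ++ mid ++ half.reverse)

-- ===== PRECONDITION & SPEC =====
def Spec_solution (text : String) (out : String) : Prop := out = solution_alt text
instance (text : String) (out : String) : Decidable (Spec_solution text out) := by unfold Spec_solution; infer_instance

-- ===== CLAIM (what is proved, stated in full; the proofs are below) =====
def Claim_equal_solution : Prop := ∀ (text : String), Dom_solution text → Spec_solution text (solution text)

-- ===== LEMMAS AND PROOFS =====

theorem insertBy_congr {α : Type} (b b' : α → α → Bool) (x : α) (ys : List α)
    (h : ∀ y ∈ ys, b x y = b' x y) :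
    PySem.List.insertBy b x ys = PySem.List.insertBy b' x ys := by
  induction ys with
  | nil => rfl
  | cons y ys ih =>
    simp only [PySem.List.insertBy]
    rw [h y (by simp)]
    by_cases hb : b' x y = true
    · simp [hb]
    · simp only [Bool.not_eq_true] at hb
      simp [hb, ih (fun z hz => h z (by simp [hz]))]

theorem foldl_insertBy_congr {α : Type} (b b' : α → α → Bool)
    (l acc : List α) (h : ∀ a ∈ l, ∀ c ∈ l ++ acc, b a c = b' a c) :
    l.foldl (fun acc x => PySem.List.insertBy b x acc) acc
      = l.foldl (fun acc x => PySem.List.insertBy b' x acc) acc := by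
  induction l generalizing acc with
  | nil => rfl
  | cons x l ih =>
    simp only [List.foldl_cons]
    rw [insertBy_congr b b' x acc (fun y hy => h x (by simp) y (by simp [hy]))]
    apply ih
    intro a ha c hc
    apply h a (by simp [ha])
    rcases List.mem_append.mp hc with hc | hc
    · simp [hc]
    · rcases (PySem.List.mem_insertBy _ _ _ _).mp hc with hc | hc
      · simp [hc]
      · simp [hc]

-- on a list whose k1-images are pairwise distinct, Python's tuple sort is the sort by first key
theorem sorted2_eq_sorted_of_inj {α κ₁ κ₂ : Type} [LinearOrder κ₁] [LinearOrder κ₂]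
    (xs : List α) (k1 : α → κ₁) (k2 : α → κ₂)
    (hinj : ∀ a ∈ xs, ∀ b ∈ xs, k1 a = k1 b → a = b) :
    PySem.List.sorted2 xs k1 k2 false = PySem.List.sorted xs k1 false := by
  simp only [PySem.List.sorted2, PySem.List.sorted, if_neg (by simp : ¬ (false = true))]
  apply foldl_insertBy_congr
  intro a ha c hc
  simp only [List.append_nil] at hc
  rcases lt_trichotomy (k1 a) (k1 c) with hlt | heq | hgt
  · simp [hlt]
  · have : a = c := hinj a ha c hc heq
    subst this
    simp
  · simp [hgt, not_lt_of_gt hgt]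

-- the sorted items of Counter(text) are the sorted distinct chars paired with their counts
theorem sorted_counter_items (xs : List Char) :
    PySem.List.sorted2 (PySem.Dict.counter xs).items (·.1) (·.2)
      = (PySem.List.sorted (PySem.Set.ofList xs) (fun x => x) false).map
          (fun k => (k, (xs.count k : Int))) := by
  rw [PySem.Dict.items_counter]
  rw [sorted2_eq_sorted_of_inj]
  · apply PySem.List.sorted_eq_of_perm_of_pairwise_lt
    · exact (PySem.List.sorted_perm _ _ _).map _
    · rw [List.pairwise_map]
      exact PySem.List.sorted_ofList_pairwise_lt xs
  · intro a ha b hb h1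
    rcases List.mem_map.mp ha with ⟨k, _, rfl⟩
    rcases List.mem_map.mp hb with ⟨k', _, rfl⟩
    simp only at h1
    simp [h1]

theorem count_flatMap_replicate {α : Type} [DecidableEq α] (xs S : List α) (hnd : S.Nodup) (a : α) :
    (S.flatMap fun k => List.replicate (xs.count k) k).count a
      = if a ∈ S then xs.count a else 0 := by
  induction S with
  | nil => simp
  | cons k S ih =>
    simp only [List.flatMap_cons, List.count_append, List.nodup_cons] at *
    rw [ih hnd.2]
    by_cases hak : a = k
    · subst hak
      simp [if_neg hnd.1]
    · simp [List.count_replicate, hak, Ne.symm hak]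

theorem pairwise_le_flatMap_replicate {α : Type} [LinearOrder α] (c : α → Nat) (ks : List α)
    (h : ks.Pairwise (· < ·)) :
    (ks.flatMap fun k => List.replicate (c k) k).Pairwise (· ≤ ·) := by
  induction ks with
  | nil => simp
  | cons k ks ih =>
    rcases List.pairwise_cons.mp h with ⟨hk, htl⟩
    simp only [List.flatMap_cons]
    apply List.pairwise_append.mpr
    refine ⟨List.pairwise_replicate.mpr (by simp), ih htl, ?_⟩
    intro x hx y hy
    have hx' := List.eq_of_mem_replicate hx
    subst hx'
    rcases List.mem_flatMap.mp hy with ⟨k', hk', hy'⟩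
    have hy'' := List.eq_of_mem_replicate hy'
    subst hy''
    exact le_of_lt (hk _ hk')

-- sorted(text) is the runs of each distinct char, in ascending order, repeated count-many times
theorem sorted_eq_flatMap_replicate (xs : List Char) :
    PySem.List.sorted xs (fun x => x) false
      = (PySem.List.sorted (PySem.Set.ofList xs) (fun x => x) false).flatMap
          (fun k => List.replicate (xs.count k) k) := by
  apply PySem.List.sorted_id_eq_of_perm_of_pairwise
  · apply List.perm_iff_count.mpr
    intro a
    have hnd : (PySem.List.sorted (PySem.Set.ofList xs) (fun x => x) false).Nodup :=
      List.Perm.nodup (PySem.List.sorted_perm (PySem.Set.ofList xs) (fun x => x) false).symm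
        (PySem.Set.nodup_ofList xs)
    rw [count_flatMap_replicate xs _ hnd a]
    by_cases ha : a ∈ xs
    · rw [if_pos]
      rw [PySem.List.mem_sorted]
      exact (PySem.Set.mem_ofList xs a).mpr ha
    · rw [if_neg, (List.count_eq_zero).mpr ha]
      rw [PySem.List.mem_sorted, PySem.Set.mem_ofList]
      exact ha
  · exact pairwise_le_flatMap_replicate _ _ (PySem.List.sorted_ofList_pairwise_lt xs)

-- closed form of A's loop over (key, count) pairs with Nat counts
theorem solutionLoop_char (c : Char → Nat) :
    ∀ (ks : List Char) (mid half : List Char), mid.length ≤ 1 →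
    solutionLoop (ks.map fun k => (k, (c k : Int))) mid half
      = if 2 ≤ mid.length + ks.countP (fun k => c k % 2 == 1) then "I'm Sorry Hansoo".toList
        else
          let H := half ++ ks.flatMap fun k => List.replicate (c k / 2) k
          H ++ (mid ++ ks.filter fun k => c k % 2 == 1) ++ H.reverse := by
  intro ks
  induction ks with
  | nil =>
    intro mid half hmid
    simp only [List.map_nil, solutionLoop, List.countP_nil, List.filter_nil, List.flatMap_nil]
    rw [if_neg (by omega)]
    simp
  | cons k t ih =>
    intro mid half hmid
    simp only [List.map_cons]
    rw [solutionLoop]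
    have hmod : PySem.Int.mod ((c k : Nat) : Int) 2 = (((c k % 2 : Nat)) : Int) :=
      PySem.Int.mod_natCast (c k) 2
    have hdiv0 : PySem.Int.floordiv ((c k : Nat) : Int) 2 = ((c k / 2 : Nat) : Int) :=
      PySem.Int.floordiv_natCast (c k) 2
    have hdiv : (PySem.Int.floordiv ((c k : Nat) : Int) 2).toNat = c k / 2 := by
      rw [hdiv0]; exact Int.toNat_natCast _
    rw [hmod, hdiv]
    by_cases hodd : c k % 2 = 1
    · rw [if_pos (show ((((c k % 2 : Nat) : Int)) == 1) = true by simp only [beq_iff_eq]; omega)]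
      have hc : (k :: t).countP (fun k => c k % 2 == 1)
          = t.countP (fun k => c k % 2 == 1) + 1 := by
        simp [hodd]
      have hfil : (k :: t).filter (fun k => c k % 2 == 1)
          = k :: t.filter (fun k => c k % 2 == 1) := by
        simp [hodd]
      cases mid with
      | cons m mtl =>
        have : mtl = [] := by cases mtl with | nil => rfl | cons _ _ => simp at hmid
        subst this
        rw [if_pos (show ((List.length ([m] : List Char) == 1) = true) by simp)]
        rw [if_pos (by rw [hc]; simp only [List.length_cons, List.length_nil]; omega)]
      | nil =>
        rw [if_neg (show ¬ ((List.length ([] : List Char) == 1) = true) by simp)]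
        rw [ih [k] _ (by simp), hc, hfil]
        by_cases hrest : 1 ≤ t.countP (fun k => c k % 2 == 1)
        · rw [if_pos (by simp only [List.length_cons, List.length_nil]; omega),
            if_pos (by simp only [List.length_nil]; omega)]
        · rw [if_neg (by simp only [List.length_cons, List.length_nil]; omega),
            if_neg (by simp only [List.length_nil]; omega)]
          simp only [List.flatMap_cons, List.nil_append, List.cons_append,
            List.append_assoc]
    · rw [if_neg (show ¬ (((((c k % 2 : Nat)) : Int)) == 1) = true by
        simp only [beq_iff_eq]; omega)]
      have hc : (k :: t).countP (fun k => c k % 2 == 1)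
          = t.countP (fun k => c k % 2 == 1) := by
        simp [hodd]
      have hfil : (k :: t).filter (fun k => c k % 2 == 1)
          = t.filter (fun k => c k % 2 == 1) := by
        simp [hodd]
      rw [ih mid _ hmid, hc, hfil]
      by_cases hrest : 2 ≤ mid.length + t.countP (fun k => c k % 2 == 1)
      · rw [if_pos hrest, if_pos hrest]
      · rw [if_neg hrest, if_neg hrest]
        simp [List.flatMap_cons, List.append_assoc]

theorem everySecond_replicate_even (m : Nat) (a : Char) (rest : List Char) :
    everySecond (List.replicate (2 * m) a ++ rest) = List.replicate m a ++ everySecond rest := by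
  induction m with
  | zero => simp
  | succ n ih =>
    have h2 : 2 * (n + 1) = (2 * n) + 1 + 1 := by omega
    rw [h2]
    simp only [List.replicate_succ, List.cons_append]
    rw [show everySecond (a :: a :: (List.replicate (2 * n) a ++ rest))
        = a :: everySecond (List.replicate (2 * n) a ++ rest) from rfl, ih]

-- all run lengths even: the stride-2 slice of the concatenated runs halves every run
theorem everySecond_flatMap_even (c : Char → Nat) :
    ∀ ks : List Char, (∀ k ∈ ks, c k % 2 = 0) →
    everySecond (ks.flatMap fun k => List.replicate (c k) k)
      = ks.flatMap fun k => List.replicate (c k / 2) k := by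
  intro ks
  induction ks with
  | nil => intro _; rfl
  | cons k t ih =>
    intro h
    have hk : c k = 2 * (c k / 2) := by have := h k (by simp); omega
    simp only [List.flatMap_cons]
    have hstep : everySecond (List.replicate (c k) k
          ++ t.flatMap fun k => List.replicate (c k) k)
        = List.replicate (c k / 2) k
          ++ everySecond (t.flatMap fun k => List.replicate (c k) k) := by
      conv_lhs => rw [hk]
      rw [everySecond_replicate_even]
    rw [hstep, ih (fun x hx => h x (by simp [hx]))]

-- one odd run: after erasing one copy of its char, the stride-2 slice halves every run
theorem everySecond_erase_flatMap (c : Char → Nat) (m : Char) :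
    ∀ ks : List Char, ks.Nodup → m ∈ ks → c m % 2 = 1 →
    (∀ k ∈ ks, k ≠ m → c k % 2 = 0) →
    everySecond ((ks.flatMap fun k => List.replicate (c k) k).erase m)
      = ks.flatMap fun k => List.replicate (c k / 2) k := by
  intro ks
  induction ks with
  | nil => intro _ h; simp at h
  | cons k t ih =>
    intro hnd hm hodd hev
    rcases List.nodup_cons.mp hnd with ⟨hkt, hndt⟩
    simp only [List.flatMap_cons]
    by_cases hkm : k = m
    · subst hkm
      have hrep : List.replicate (c k) k = k :: List.replicate (c k - 1) k := by
        rw [← List.replicate_succ]; congr 1; omega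
      rw [hrep]
      simp only [List.cons_append, List.erase_cons_head]
      have h2 : c k - 1 = 2 * (c k / 2) := by omega
      rw [h2, everySecond_replicate_even,
        everySecond_flatMap_even c t
          (fun x hx => hev x (by simp [hx]) (fun he => hkt (he ▸ hx)))]
    · have hmt : m ∈ t := by
        rcases List.mem_cons.mp hm with h | h
        · exact absurd h.symm hkm
        · exact h
      have hkeven : c k = 2 * (c k / 2) := by
        have := hev k (by simp) hkm; omega
      have hnomem : m ∉ List.replicate (c k) k := by
        intro h; exact hkm (List.eq_of_mem_replicate h).symm
      rw [List.erase_append_right _ hnomem]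
      have hstep : everySecond (List.replicate (c k) k
            ++ ((t.flatMap fun k => List.replicate (c k) k).erase m))
          = List.replicate (c k / 2) k
            ++ everySecond ((t.flatMap fun k => List.replicate (c k) k).erase m) := by
        conv_lhs => rw [hkeven]
        rw [everySecond_replicate_even]
      rw [hstep, ih hndt hmt hodd (fun x hx hxm => hev x (by simp [hx]) hxm)]

-- ===== VERDICT (by name: the statement is the Claim_ definition above) =====
theorem solution_spec : Claim_equal_solution := by
  intro text _
  unfold Spec_solution solution solution_alt
  have hsc : ∀ a : Char, (PySem.List.sorted text.toList (fun x => x) false).count a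
      = text.toList.count a :=
    fun a => (PySem.List.sorted_perm text.toList (fun x => x) false).count_eq a
  simp only [hsc]
  rw [sorted_counter_items,
    solutionLoop_char (fun k => text.toList.count k) _ [] [] (by simp)]
  have hpermk : (PySem.List.sorted (PySem.Set.ofList text.toList) (fun x => x) false).Perm
      (PySem.Set.ofList text.toList) :=
    PySem.List.sorted_perm _ _ _
  have hpermf := hpermk.filter (fun k => text.toList.count k % 2 == 1)
  have hlen : ((PySem.Set.ofList text.toList).filter
        (fun k => text.toList.count k % 2 == 1)).length
      = (PySem.List.sorted (PySem.Set.ofList text.toList) (fun x => x) false).countP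
        (fun k => text.toList.count k % 2 == 1) := by
    rw [List.countP_eq_length_filter]
    exact hpermf.length_eq.symm
  have hnd : (PySem.List.sorted (PySem.Set.ofList text.toList) (fun x => x) false).Nodup :=
    hpermk.symm.nodup (PySem.Set.nodup_ofList text.toList)
  by_cases hbig : 1 < ((PySem.Set.ofList text.toList).filter
      (fun k => text.toList.count k % 2 == 1)).length
  · rw [if_pos hbig,
      if_pos (show 2 ≤ ([] : List Char).length
          + (PySem.List.sorted (PySem.Set.ofList text.toList) (fun x => x) false).countP
            (fun k => text.toList.count k % 2 == 1) by
        rw [hlen] at hbig; simp only [List.length_nil]; omega)]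
    simp
  · rw [if_neg hbig,
      if_neg (show ¬ 2 ≤ ([] : List Char).length
          + (PySem.List.sorted (PySem.Set.ofList text.toList) (fun x => x) false).countP
            (fun k => text.toList.count k % 2 == 1) by
        rw [hlen] at hbig; simp only [List.length_nil]; omega)]
    rcases Nat.lt_or_ge ((PySem.Set.ofList text.toList).filter
        (fun k => text.toList.count k % 2 == 1)).length 1 with h0 | h1
    · -- no odd-count character
      have hoddnil : (PySem.Set.ofList text.toList).filter
          (fun k => text.toList.count k % 2 == 1) = [] :=
        List.length_eq_zero_iff.mp (by omega)
      have hfilnil : (PySem.List.sorted (PySem.Set.ofList text.toList) (fun x => x) false).filter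
          (fun k => text.toList.count k % 2 == 1) = [] := by
        rw [hoddnil] at hpermf
        exact hpermf.eq_nil
      rw [hoddnil, hfilnil]
      simp only [List.take_nil, List.nil_append, List.append_nil]
      have heven : ∀ k ∈ PySem.List.sorted (PySem.Set.ofList text.toList) (fun x => x) false,
          text.toList.count k % 2 = 0 := by
        intro k hk
        by_contra hne
        have hmemf : k ∈ (PySem.List.sorted (PySem.Set.ofList text.toList)
            (fun x => x) false).filter (fun k => text.toList.count k % 2 == 1) :=
          List.mem_filter.mpr ⟨hk, by simp only [beq_iff_eq]; omega⟩
        rw [hfilnil] at hmemf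
        simp at hmemf
      rw [sorted_eq_flatMap_replicate text.toList,
        everySecond_flatMap_even (fun k => text.toList.count k) _ heven]
    · -- exactly one odd-count character m
      have hone : ((PySem.Set.ofList text.toList).filter
          (fun k => text.toList.count k % 2 == 1)).length = 1 := by omega
      rcases List.length_eq_one_iff.mp hone with ⟨m, hoddm⟩
      have hfilm : (PySem.List.sorted (PySem.Set.ofList text.toList) (fun x => x) false).filter
          (fun k => text.toList.count k % 2 == 1) = [m] := by
        rw [hoddm] at hpermf
        exact List.perm_singleton.mp hpermf
      rw [hoddm, hfilm]
      simp only [show List.take 1 [m] = [m] from rfl, List.nil_append]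
      have hmks : m ∈ PySem.List.sorted (PySem.Set.ofList text.toList) (fun x => x) false := by
        have : m ∈ [m] := by simp
        rw [← hfilm] at this
        exact List.mem_of_mem_filter this
      have hmodd : text.toList.count m % 2 = 1 := by
        have : m ∈ [m] := by simp
        rw [← hfilm] at this
        have := List.of_mem_filter this
        simpa using this
      have hms : m ∈ PySem.List.sorted text.toList (fun x => x) false := by
        rw [(PySem.List.sorted_perm text.toList (fun x => x) false).mem_iff]
        exact List.count_pos_iff.mp (by omega)
      rw [PySem.List.remove?_eq_some_erase _ m hms]
      simp only [Option.getD_some]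
      have heven : ∀ k ∈ PySem.List.sorted (PySem.Set.ofList text.toList) (fun x => x) false,
          k ≠ m → text.toList.count k % 2 = 0 := by
        intro k hk hne
        by_contra hne2
        have hmemf : k ∈ (PySem.List.sorted (PySem.Set.ofList text.toList)
            (fun x => x) false).filter (fun k => text.toList.count k % 2 == 1) :=
          List.mem_filter.mpr ⟨hk, by simp only [beq_iff_eq]; omega⟩
        rw [hfilm] at hmemf
        simp only [List.mem_singleton] at hmemf
        exact hne hmemf
      rw [sorted_eq_flatMap_replicate text.toList,
        everySecond_erase_flatMap (fun k => text.toList.count k) m _ hnd hmks hmodd heven]
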